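-- pv_equiv track=rewrite | github.com/NotHotmilk/psolver | solvers/puzzles/TransformMatrix.py | transform_matrix
-- ===== SOURCE A (Python) =====
-- def rotate_90(matrix):
--     return list(zip(*matrix[::-1]))
--
-- def rotate_180(matrix):
--     return rotate_90(rotate_90(matrix))
--
-- def rotate_270(matrix):
--     return rotate_90(rotate_180(matrix))
--
-- def transform_matrix(matrix):
--     l = len(matrix) // 2
--     top_left = [row[:l] for row in matrix[:l]]
--     top_right = [row[l:] for row in matrix[:l]]
--     bottom_left = [row[:l] for row in matrix[l:]]
--     bottom_right = [row[l:] for row in matrix[l:]]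
--
--     top_right_rotated = rotate_90(top_right)
--     bottom_right_rotated = rotate_180(bottom_right)
--     bottom_left_rotated = rotate_270(bottom_left)
--
--     new_matrix = []
--
--     for i in range(l):
--         new_matrix.append(list(top_left[i]) + list(top_right_rotated[i]))
--     for i in range(l):
--         new_matrix.append(list(bottom_left_rotated[i]) + list(bottom_right_rotated[i]))
--
--     return new_matrix
-- ===== SOURCE B (Python) =====
-- def transform_matrix(matrix):
--     l = len(matrix) // 2
--     top = matrix[:l]
--     bottom = matrix[l:]
--     out = []
--     for i in range(l):
--         out.append(list(matrix[i][:l]) + [row[l + i] for row in reversed(top)])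
--     for i in range(l):
--         out.append([row[l - 1 - i] for row in bottom]
--                    + list(reversed(matrix[len(matrix) - 1 - i][l:])))
--     return out
-- ===== Notes on version B (the rewrite author's own statement) =====
-- stated objective: alternative
-- what changed: Instead of slicing out four quadrant sub-matrices and zip-rotating them, B builds each output row directly from the original matrix with slices, reversed tails and column comprehensions; Pre_ excludes matrices whose last l rows do not all have the minimal bottom-half row length, where A's zip silently truncates the 180-degree-rotated bottom-right quadrant to the shortest bottom row -- an accidental width no caller would specify -- while B keeps each source row's own tail (it also excludes the inputs where A raises IndexError).
import Mathlib
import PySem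

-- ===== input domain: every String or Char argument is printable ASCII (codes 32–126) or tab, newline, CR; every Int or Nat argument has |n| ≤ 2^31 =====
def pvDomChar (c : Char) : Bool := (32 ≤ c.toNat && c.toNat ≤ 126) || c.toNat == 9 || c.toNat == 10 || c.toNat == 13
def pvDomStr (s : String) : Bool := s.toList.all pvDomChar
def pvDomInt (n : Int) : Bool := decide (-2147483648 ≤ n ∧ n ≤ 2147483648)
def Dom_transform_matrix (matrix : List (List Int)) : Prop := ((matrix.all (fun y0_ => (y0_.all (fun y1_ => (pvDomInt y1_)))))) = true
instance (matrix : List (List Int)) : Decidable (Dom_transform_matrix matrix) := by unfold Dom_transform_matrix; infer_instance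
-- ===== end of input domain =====

-- B replaces the quadrant-slicing + zip-rotation pipeline by a direct build of each output row
-- from the original matrix via slices, reversed tails and column comprehensions (objective: alternative).

-- ===== PORT A =====
-- zip(*rows) truncates to the shortest row; pyMinLen is that length (0 for no rows, matching zip(*[]) = []).
-- The getD default is never reached since j < every row's length; exact for Python zip on lists of int lists.
def pyMinLen (rows : List (List Int)) : Nat :=
  match rows with
  | [] => 0
  | r :: rs => rs.foldl (fun m x => min m x.length) r.length

def pyZipStar (rows : List (List Int)) : List (List Int) :=
  (List.range (pyMinLen rows)).map (fun j => rows.map (fun r => r.getD j 0))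

def rot90 (m : List (List Int)) : List (List Int) := pyZipStar m.reverse
def rot180 (m : List (List Int)) : List (List Int) := rot90 (rot90 m)
def rot270 (m : List (List Int)) : List (List Int) := rot90 (rot180 m)

-- the two append loops become maps over range l; indexing is in range under Pre_ (Python raises IndexError otherwise)
def transform_matrix (matrix : List (List Int)) : List (List Int) :=
  let l := matrix.length / 2
  let top_left := (matrix.take l).map (fun r => r.take l)
  let top_right := (matrix.take l).map (fun r => r.drop l)
  let bottom_left := (matrix.drop l).map (fun r => r.take l)
  let bottom_right := (matrix.drop l).map (fun r => r.drop l)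
  let trr := rot90 top_right
  let brr := rot180 bottom_right
  let blr := rot270 bottom_left
  ((List.range l).map (fun i => top_left.getD i [] ++ trr.getD i []))
    ++ ((List.range l).map (fun i => blr.getD i [] ++ brr.getD i []))

-- ===== PORT B =====
-- each comprehension becomes a map (over range l, or over the half it iterates); reversed(xs) is
-- List.reverse, slices are take/drop; matrix[i][j] indexing is in range under Pre_ (IndexError otherwise)
def transform_matrix_alt (matrix : List (List Int)) : List (List Int) :=
  let n := matrix.length
  let l := n / 2
  ((List.range l).map (fun i =>
      (matrix.getD i []).take l
      ++ (matrix.take l).reverse.map (fun row => row.getD (l + i) 0)))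
  ++ ((List.range l).map (fun i =>
      (matrix.drop l).map (fun row => row.getD (l - 1 - i) 0)
      ++ ((matrix.getD (n - 1 - i) []).drop l).reverse))

-- ===== PRECONDITION & SPEC =====
-- Pre_ excludes the inputs where A raises IndexError (a top row shorter than 2·l or a bottom row
-- shorter than l+1, l = n/2 ≥ 1) and the matrices whose last l rows do not all have the minimal
-- bottom-half row length: there A's zip silently truncates the 180°-rotated bottom-right quadrant
-- to the shortest bottom row — an accidental width no caller would specify — while B keeps each
-- source row's own tail.
def Pre_transform_matrix (matrix : List (List Int)) : Prop :=
  matrix.length ≤ 1 ∨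
    ((∀ row ∈ matrix.take (matrix.length / 2), 2 * (matrix.length / 2) ≤ row.length) ∧
     (∀ row ∈ matrix.drop (matrix.length / 2), matrix.length / 2 + 1 ≤ row.length) ∧
     (∀ row ∈ matrix.drop (matrix.length - matrix.length / 2),
        row.length = (matrix.getD (matrix.length - 1) []).length) ∧
     (∀ row ∈ matrix.drop (matrix.length / 2),
        (matrix.getD (matrix.length - 1) []).length ≤ row.length))
instance (matrix : List (List Int)) : Decidable (Pre_transform_matrix matrix) := by
  unfold Pre_transform_matrix; infer_instance
def pvWitness_transform_matrix : List (List Int) := [[1, 2], [3, 4]]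
def Spec_transform_matrix (matrix : List (List Int)) (out : List (List Int)) : Prop := out = transform_matrix_alt matrix
instance (matrix : List (List Int)) (out : List (List Int)) : Decidable (Spec_transform_matrix matrix out) := by unfold Spec_transform_matrix; infer_instance

-- ===== CLAIM (what is proved, stated in full; the proofs are below) =====
def Claim_equal_transform_matrix : Prop := ∀ (matrix : List (List Int)), Dom_transform_matrix matrix → Pre_transform_matrix matrix → Spec_transform_matrix matrix (transform_matrix matrix)

-- ===== LEMMAS AND PROOFS =====

theorem getD_map_range {β : Type} (g : Nat → β) (M i : Nat) (h : i < M) (d : β) :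
    ((List.range M).map g).getD i d = g i := by
  simp [List.getD_eq_getElem?_getD, h]

theorem map_eq_map_range {α β : Type} (xs : List α) (f : α → β) (d : α) :
    xs.map f = (List.range xs.length).map (fun j => f (xs.getD j d)) := by
  apply List.ext_getElem
  · simp
  · intro i h1 h2
    simp at h1
    simp [List.getElem?_eq_getElem h1]

theorem reverse_map_range {β : Type} (c : Nat) (g : Nat → β) :
    ((List.range c).map g).reverse = (List.range c).map (fun i => g (c - 1 - i)) := by
  apply List.ext_getElem
  · simp
  · intro i h1 h2
    simp [List.getElem_reverse]

theorem reverse_eq_map_range (xs : List Int) :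
    xs.reverse = (List.range xs.length).map (fun j => xs.getD (xs.length - 1 - j) 0) := by
  apply List.ext_getElem
  · simp
  · intro i h1 h2
    simp at h1
    rw [List.getElem_reverse]
    simp [List.getElem?_eq_getElem (show xs.length - 1 - i < xs.length by omega)]

theorem foldl_min_le (xs : List Nat) (a : Nat) : xs.foldl min a ≤ a ∧ ∀ y ∈ xs, xs.foldl min a ≤ y := by
  induction xs generalizing a with
  | nil => simp
  | cons x xs ih =>
    refine ⟨?_, ?_⟩
    · exact le_trans (ih (min a x)).1 (by omega)
    · intro y hy
      rcases List.mem_cons.mp hy with rfl | hy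
      · exact le_trans (ih (min a y)).1 (by omega)
      · exact (ih (min a x)).2 y hy

theorem foldl_min_mem (xs : List Nat) (a : Nat) : xs.foldl min a = a ∨ xs.foldl min a ∈ xs := by
  induction xs generalizing a with
  | nil => simp
  | cons x xs ih =>
    rcases ih (min a x) with h | h
    · simp only [List.foldl_cons]
      rcases Nat.le_total a x with hle | hle
      · left; rw [h]; omega
      · right; rw [h]; simp [show min a x = x by omega]
    · right; exact List.mem_cons_of_mem _ h

def listMinNat : List Nat → Nat
  | [] => 0
  | x :: xs => xs.foldl min x

theorem listMinNat_le_of_mem (xs : List Nat) (y : Nat) (h : y ∈ xs) : listMinNat xs ≤ y := by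
  cases xs with
  | nil => simp at h
  | cons x xs =>
    rcases List.mem_cons.mp h with rfl | hy
    · exact (foldl_min_le xs y).1
    · exact (foldl_min_le xs x).2 y hy

theorem listMinNat_mem (xs : List Nat) (h : xs ≠ []) : listMinNat xs ∈ xs := by
  cases xs with
  | nil => simp at h
  | cons x xs =>
    rcases foldl_min_mem xs x with h2 | h2
    · simp [listMinNat, h2]
    · exact List.mem_cons_of_mem _ h2

theorem pyMinLen_eq (rows : List (List Int)) : pyMinLen rows = listMinNat (rows.map List.length) := by
  cases rows with
  | nil => rfl
  | cons r rs => simp [pyMinLen, listMinNat, List.foldl_map]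

theorem pyZipStar_getD (rows : List (List Int)) (i : Nat) (h : i < pyMinLen rows) :
    (pyZipStar rows).getD i [] = rows.map (fun r => r.getD i 0) := by
  unfold pyZipStar; exact getD_map_range _ _ _ h _

theorem pyMinLen_const (rows : List (List Int)) (c : Nat) (h1 : rows ≠ [])
    (hc : ∀ r ∈ rows, r.length = c) : pyMinLen rows = c := by
  rw [pyMinLen_eq]
  apply Nat.le_antisymm
  · have := listMinNat_mem (rows.map List.length) (by simpa using h1)
    rcases List.mem_map.mp this with ⟨r, hr, he⟩
    rw [← he, hc r hr]
  · rcases List.exists_mem_of_ne_nil rows h1 with ⟨r, hr⟩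
    have hall : ∀ y ∈ rows.map List.length, c ≤ y := by
      intro y hy
      rcases List.mem_map.mp hy with ⟨r', hr', he⟩
      rw [← he, hc r' hr']
    exact hall _ (listMinNat_mem _ (by simpa using h1))

theorem pyZipStar_rect (rows : List (List Int)) (Rn c : Nat) (hlen : rows.length = Rn)
    (h1 : rows ≠ []) (hc : ∀ r ∈ rows, r.length = c) :
    pyZipStar rows = (List.range c).map (fun i => (List.range Rn).map (fun j => (rows.getD j []).getD i 0)) := by
  unfold pyZipStar
  rw [pyMinLen_const rows c h1 hc]
  apply List.map_congr_left
  intro i _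
  rw [map_eq_map_range rows _ [], hlen]

theorem getD_drop_add (xs : List Int) (l i : Nat) (h : l + i < xs.length) :
    (xs.drop l).getD i 0 = xs.getD (l + i) 0 := by
  rw [List.getD_eq_getElem _ _ (by simp; omega), List.getD_eq_getElem _ _ h]
  simp

theorem getD_take (xs : List Int) (l k : Nat) (h1 : k < l) (h2 : k < xs.length) :
    (xs.take l).getD k 0 = xs.getD k 0 := by
  rw [List.getD_eq_getElem _ _ (by simp; omega), List.getD_eq_getElem _ _ h2]
  simp

theorem getD_reverse (xs : List (List Int)) (k : Nat) (h : k < xs.length) :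
    xs.reverse.getD k [] = xs.getD (xs.length - 1 - k) [] := by
  rw [List.getD_eq_getElem _ _ (by simpa), List.getD_eq_getElem _ _ (by omega)]
  simp [List.getElem_reverse]

theorem getD_map_take (f : List Int → List Int) (xs : List (List Int)) (l k : Nat)
    (hk : k < l) (hl : l ≤ xs.length) :
    ((xs.take l).map f).getD k [] = f (xs.getD k []) := by
  rw [List.getD_eq_getElem _ _ (by simp; omega), List.getD_eq_getElem _ _ (by omega)]
  simp

theorem getD_map_drop (f : List Int → List Int) (xs : List (List Int)) (l k : Nat)
    (hk : l + k < xs.length) :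
    ((xs.drop l).map f).getD k [] = f (xs.getD (l + k) []) := by
  rw [List.getD_eq_getElem _ _ (by simp; omega), List.getD_eq_getElem _ _ hk]
  simp

theorem getD_mem_take (xs : List (List Int)) (l i : Nat) (hi : i < l) (hl : l ≤ xs.length) :
    xs.getD i [] ∈ xs.take l := by
  rw [List.getD_eq_getElem _ _ (by omega)]
  have h2 : i < (xs.take l).length := by simp; omega
  have : xs[i] = (xs.take l)[i]'h2 := by simp
  rw [this]
  exact List.getElem_mem _

theorem getD_mem_drop (xs : List (List Int)) (l i : Nat) (hi : l ≤ i) (h2 : i < xs.length) :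
    xs.getD i [] ∈ xs.drop l := by
  rw [List.getD_eq_getElem _ _ h2]
  have h3 : i - l < (xs.drop l).length := by simp; omega
  have : xs[i] = (xs.drop l)[i - l]'h3 := by
    rw [List.getElem_drop]
    congr 1
    omega
  rw [this]
  exact List.getElem_mem _

theorem getD_drop_add_row (xs : List (List Int)) (l i : Nat) (h : l + i < xs.length) :
    (xs.drop l).getD i [] = xs.getD (l + i) [] := by
  rw [List.getD_eq_getElem _ _ (by simp; omega), List.getD_eq_getElem _ _ h]
  simp

-- ===== VERDICT (by name: the statement is the Claim_ definition above) =====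
theorem transform_matrix_spec : Claim_equal_transform_matrix := by
  intro matrix _ hpre
  unfold Spec_transform_matrix
  by_cases hl0 : matrix.length / 2 = 0
  · by_cases h0 : matrix.length = 0
    · simp [transform_matrix, transform_matrix_alt, h0]
    · simp [transform_matrix, transform_matrix_alt, hl0]
  · rcases hpre with h | ⟨htop, hbot, hlast, hmin⟩
    · omega
    simp only [transform_matrix, transform_matrix_alt]
    set n := matrix.length with hn
    set l := n / 2 with hldef
    have hl1 : 1 ≤ l := by omega
    have hln : l < n := by omega
    set R := n - l with hRdef
    have hlR : l ≤ R := by omega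
    set L := (matrix.getD (n - 1) []).length with hLdef
    have hlastmem : matrix.getD (n - 1) [] ∈ matrix.drop l :=
      getD_mem_drop matrix l (n - 1) (by omega) (by omega)
    have hL1 : l + 1 ≤ L := hbot _ hlastmem
    set m := L - l with hmdef
    have hm1 : 1 ≤ m := by omega
    have hdroplen : (matrix.drop l).length = R := by
      rw [List.length_drop, ← hn]
    have htakelen : (matrix.take l).length = l := by
      rw [List.length_take, ← hn]; omega
    -- per-index forms of the row-length hypotheses
    have hrowT : ∀ i, i < l → 2 * l ≤ (matrix.getD i []).length := by
      intro i hi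
      exact htop _ (getD_mem_take matrix l i hi (by omega))
    have hrowB : ∀ i, l ≤ i → i < n → l + 1 ≤ (matrix.getD i []).length := by
      intro i h1 h2
      exact hbot _ (getD_mem_drop matrix l i h1 (by omega))
    have hrowM : ∀ i, l ≤ i → i < n → L ≤ (matrix.getD i []).length := by
      intro i h1 h2
      exact hmin _ (getD_mem_drop matrix l i h1 (by omega))
    have hrowL : ∀ i, n - l ≤ i → i < n → (matrix.getD i []).length = L := by
      intro i h1 h2
      exact hlast _ (getD_mem_drop matrix (n - l) i h1 (by omega))
    congr 1
    · -- top half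
      apply List.map_congr_left
      intro i hi
      have hil : i < l := List.mem_range.mp hi
      congr 1
      · exact getD_map_take _ _ _ _ hil (by omega)
      · have hminT : l ≤ pyMinLen ((matrix.take l).map (fun r => r.drop l)).reverse := by
          rw [pyMinLen_eq]
          have hlen2 : ((((matrix.take l).map (fun r => r.drop l)).reverse).map List.length).length = l := by
            simp; omega
          have hne : (((matrix.take l).map (fun r => r.drop l)).reverse).map List.length ≠ [] := by
            intro hcon; rw [hcon] at hlen2; simp at hlen2; omega
          have hmm := listMinNat_mem _ hne
          rcases List.mem_map.mp hmm with ⟨r, hr, he⟩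
          rw [List.mem_reverse] at hr
          rcases List.mem_map.mp hr with ⟨s, hs, hse⟩
          have := htop _ hs
          rw [← he, ← hse, List.length_drop]
          omega
        rw [rot90, pyZipStar_getD _ i (by omega)]
        rw [← List.map_reverse, List.map_map]
        apply List.map_congr_left
        intro row hrow
        rw [List.mem_reverse] at hrow
        have := htop _ hrow
        exact getD_drop_add row l i (by omega)
    · -- bottom half
      set B1 := (matrix.drop l).map (fun r => r.take l) with hB1def
      set B2 := (matrix.drop l).map (fun r => r.drop l) with hB2def
      have hB1len : B1.length = R := by rw [hB1def]; simp; omega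
      have hB1ne : B1 ≠ [] := by
        intro hcon; have := congrArg List.length hcon; rw [hB1len] at this; simp at this; omega
      have hbl_rows : ∀ r ∈ B1, r.length = l := by
        intro r hr
        rw [hB1def] at hr
        rcases List.mem_map.mp hr with ⟨s, hs, he⟩
        have := hbot _ hs
        rw [← he]
        simp
        omega
      have hrev_len : B1.reverse.length = R := by simp [hB1len]
      have hrev_ne : B1.reverse ≠ [] := by simpa using hB1ne
      have hrev_rows : ∀ r ∈ B1.reverse, r.length = l := fun r hr => hbl_rows r (List.mem_reverse.mp hr)
      have e1 : pyZipStar B1.reverse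
          = (List.range l).map (fun i => (List.range R).map (fun j => (B1.reverse.getD j []).getD i 0)) :=
        pyZipStar_rect _ R l hrev_len hrev_ne hrev_rows
      have e1r : (pyZipStar B1.reverse).reverse
          = (List.range l).map (fun i => (List.range R).map (fun j => (B1.reverse.getD j []).getD (l - 1 - i) 0)) := by
        rw [e1, reverse_map_range]
      have e2 : pyZipStar (pyZipStar B1.reverse).reverse
          = (List.range R).map (fun i => (List.range l).map (fun j => (B1.reverse.getD i []).getD (l - 1 - j) 0)) := by
        rw [e1r, pyZipStar_rect _ l R (by simp) (by simp; omega)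
          (by intro r hr; rcases List.mem_map.mp hr with ⟨_, _, he⟩; rw [← he]; simp)]
        apply List.map_congr_left
        intro i hi
        apply List.map_congr_left
        intro j hj
        rw [getD_map_range _ _ _ (List.mem_range.mp hj) _,
            getD_map_range _ _ _ (List.mem_range.mp hi) _]
      have e2r : (pyZipStar (pyZipStar B1.reverse).reverse).reverse
          = (List.range R).map (fun i => (List.range l).map (fun j => (B1.reverse.getD (R - 1 - i) []).getD (l - 1 - j) 0)) := by
        rw [e2, reverse_map_range]
      have e3 : rot270 B1
          = (List.range l).map (fun i => (List.range R).map (fun j => (B1.reverse.getD (R - 1 - j) []).getD (l - 1 - i) 0)) := by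
        simp only [rot270, rot180, rot90]
        rw [e2r, pyZipStar_rect _ R l (by simp) (by simp; omega)
          (by intro r hr; rcases List.mem_map.mp hr with ⟨_, _, he⟩; rw [← he]; simp)]
        apply List.map_congr_left
        intro i hi
        apply List.map_congr_left
        intro j hj
        rw [getD_map_range _ _ _ (List.mem_range.mp hj) _,
            getD_map_range _ _ _ (List.mem_range.mp hi) _]
      have hB2len : B2.length = R := by rw [hB2def]; simp; omega
      have hB2revlen : B2.reverse.length = R := by simp [hB2len]
      have hmB2 : pyMinLen B2.reverse = m := by
        rw [pyMinLen_eq]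
        have hmaps : B2.reverse.map List.length = (((matrix.drop l).map List.length).map (fun y => y - l)).reverse := by
          rw [hB2def]
          simp [List.map_reverse, List.map_map, Function.comp_def]
        rw [hmaps]
        apply Nat.le_antisymm
        · have hLmem : L ∈ (matrix.drop l).map List.length :=
            List.mem_map.mpr ⟨matrix.getD (n - 1) [], hlastmem, rfl⟩
          have : m ∈ ((((matrix.drop l).map List.length).map (fun y => y - l)).reverse) := by
            rw [List.mem_reverse]
            exact List.mem_map.mpr ⟨L, hLmem, by omega⟩
          exact listMinNat_le_of_mem _ _ this
        · have hne2 : ((((matrix.drop l).map List.length).map (fun y => y - l)).reverse) ≠ [] := by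
            simp; omega
          have hmm := listMinNat_mem _ hne2
          rw [List.mem_reverse] at hmm
          rcases List.mem_map.mp hmm with ⟨y, hy, he⟩
          rcases List.mem_map.mp hy with ⟨r, hr, hre⟩
          have := hmin _ hr
          omega
      have f1 : pyZipStar B2.reverse
          = (List.range m).map (fun i => (List.range R).map (fun j => (B2.reverse.getD j []).getD i 0)) := by
        simp only [pyZipStar]
        rw [hmB2]
        apply List.map_congr_left
        intro i _
        rw [map_eq_map_range B2.reverse _ [], hB2revlen]
      have f1r : (pyZipStar B2.reverse).reverse
          = (List.range m).map (fun i => (List.range R).map (fun j => (B2.reverse.getD j []).getD (m - 1 - i) 0)) := by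
        rw [f1, reverse_map_range]
      have f2 : rot180 B2
          = (List.range R).map (fun i => (List.range m).map (fun j => (B2.reverse.getD i []).getD (m - 1 - j) 0)) := by
        simp only [rot180, rot90]
        rw [f1r, pyZipStar_rect _ m R (by simp) (by simp; omega)
          (by intro r hr; rcases List.mem_map.mp hr with ⟨_, _, he⟩; rw [← he]; simp)]
        apply List.map_congr_left
        intro i hi
        apply List.map_congr_left
        intro j hj
        rw [getD_map_range _ _ _ (List.mem_range.mp hj) _,
            getD_map_range _ _ _ (List.mem_range.mp hi) _]
      apply List.map_congr_left
      intro i hi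
      have hil : i < l := List.mem_range.mp hi
      congr 1
      · -- bottom-left column comprehension
        rw [e3, getD_map_range _ _ _ hil _]
        rw [map_eq_map_range (matrix.drop l) (fun row => row.getD (l - 1 - i) 0) [], hdroplen]
        apply List.map_congr_left
        intro j hj
        have hjR : j < R := List.mem_range.mp hj
        rw [getD_reverse _ _ (by rw [hB1len]; omega), hB1len,
            show R - 1 - (R - 1 - j) = j by omega]
        rw [hB1def, getD_map_drop _ _ _ _ (show l + j < matrix.length by rw [← hn]; omega)]
        rw [getD_drop_add_row _ _ _ (show l + j < matrix.length by rw [← hn]; omega)]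
        exact getD_take _ _ _ (by omega) (by have := hrowB (l + j) (by omega) (by omega); omega)
      · -- bottom-right reversed tail
        rw [f2, getD_map_range _ _ _ (show i < R by omega) _]
        rw [getD_reverse _ _ (by rw [hB2len]; omega), hB2len]
        rw [hB2def, getD_map_drop _ _ _ _ (show l + (R - 1 - i) < matrix.length by rw [← hn]; omega)]
        have hidx : l + (R - 1 - i) = n - 1 - i := by omega
        rw [hidx]
        have hxs : ((matrix.getD (n - 1 - i) []).drop l).length = m := by
          have := hrowL (n - 1 - i) (by omega) (by omega)
          rw [List.length_drop]
          omega
        rw [reverse_eq_map_range ((matrix.getD (n - 1 - i) []).drop l), hxs]
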